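-- pv_equiv track=rewrite | github.com/Gravitar64/Advent-of-Code-2023 | day15.py | solve
-- ===== SOURCE A (Python) =====
-- import time, collections
--
-- def hash(s):
--   result = 0
--   for c in s:
--     result = ((result + ord(c))*17) % 256
--   return result
--
-- def solve(p):
--   part1 = sum(hash(s) for s in p)
--
--   boxes = collections.defaultdict(dict)
--   for s in p:
--     if '=' in s:
--       label, n = s.split('=')
--       boxes[hash(label)][label]=int(n)
--     else:
--       label = s[:-1]
--       boxes[hash(label)].pop(label,None)
--
--   part2 = sum((bn+1) * ln * fl for bn, lenses in boxes.items()
--                                for ln, fl in enumerate(lenses.values(), start = 1))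
--   return part1, part2
-- ===== SOURCE B (Python) =====
-- def hash(s):
--   result = 0
--   for c in s:
--     result = ((result + ord(c))*17) % 256
--   return result
--
-- def solve(p):
--   part1 = sum(hash(s) for s in p)
--
--   # offline last-write analysis: instead of simulating insert/update/remove on
--   # boxes, record each label's last '-' index and the list of '=' events, keep
--   # only '=' events after the label's last '-' (dict order gives the insertion
--   # slot, last write gives the focal), and recover slot numbers by counting.
--   last_minus = {}          # label -> index of its last '-' step
--   eq_steps = []            # (index, label, focal) for every '=' step
--   for i, s in enumerate(p):
--     if '=' in s:
--       label, n = s.split('=')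
--       eq_steps.append((i, label, int(n)))
--     else:
--       last_minus[s[:-1]] = i
--
--   foc = {}                 # label -> focal of its last surviving '=' step;
--   for i, label, n in eq_steps:   # insertion order = first surviving '=' step
--     if i > last_minus.get(label, -1):
--       foc[label] = n
--
--   part2 = 0
--   slots = [0]*256          # per-box slot counters over the global order
--   for label, fl in foc.items():
--     b = hash(label)
--     slots[b] += 1
--     part2 += (b+1) * slots[b] * fl
--   return part1, part2
-- ===== Notes on version B (the rewrite author's own statement) =====
-- stated objective: alternative
-- what changed: B never simulates the boxes: instead of A's online dict-of-dicts with per-step insert/overwrite/pop, it records each label's last '-' index and the list of '=' events, keeps only '=' events after the label's last '-' (last write gives the focal, dict insertion order the slot order), and computes the focusing power with per-box slot counters instead of enumerating per-box containers.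
import Mathlib
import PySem

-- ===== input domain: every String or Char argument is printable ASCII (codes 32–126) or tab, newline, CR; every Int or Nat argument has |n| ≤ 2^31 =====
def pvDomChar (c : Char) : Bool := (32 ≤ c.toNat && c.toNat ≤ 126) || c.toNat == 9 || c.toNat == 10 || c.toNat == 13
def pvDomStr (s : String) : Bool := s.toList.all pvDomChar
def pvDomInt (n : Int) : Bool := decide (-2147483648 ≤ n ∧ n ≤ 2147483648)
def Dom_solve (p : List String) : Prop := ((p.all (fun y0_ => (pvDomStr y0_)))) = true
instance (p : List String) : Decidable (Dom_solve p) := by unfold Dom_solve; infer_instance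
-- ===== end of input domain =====

-- B replaces A's online box simulation (dict-of-dicts with insert/overwrite/pop per step) by an
-- offline last-write analysis of the event indices, recovering slot numbers with per-box counters.

-- ===== PORT A =====
-- hash(s): shared verbatim by both Pythons
def splitEq (s : String) : List String := (PySem.Str.split? s "=").getD []

def pyHash (s : String) : Int :=
  s.toList.foldl (fun result c => PySem.Int.mod ((result + (c.toNat : Int)) * 17) 256) 0

def solveStepA (boxes : PySem.Dict Int (PySem.Dict String Int)) (s : String) :
    PySem.Dict Int (PySem.Dict String Int) :=
  if PySem.Str.isIn "=" s then
    match splitEq s with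
    | [label, n] =>
        -- boxes[hash(label)][label] = int(n)  (defaultdict access then item set)
        boxes.insert (pyHash label)
          ((boxes.getD (pyHash label) PySem.Dict.empty).insert label ((PySem.Int.ofStr? n).getD 0))
    | _ => boxes   -- Python raises ValueError here (≠ 2 pieces); excluded by Pre_solve
  else
    let label := PySem.Str.slice s none (some (-1))
    boxes.insert (pyHash label) ((boxes.getD (pyHash label) PySem.Dict.empty).erase label)

def solve (p : List String) : Int × Int :=
  let part1 := (p.map (fun s => pyHash s)).sum
  let boxes := p.foldl solveStepA PySem.Dict.empty
  let part2 := (boxes.items.map (fun bd =>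
      ((PySem.List.enumerate bd.2.values 1).map (fun lf => (bd.1 + 1) * lf.1 * lf.2)).sum)).sum
  (part1, part2)

-- ===== PORT B =====
-- first loop: collect last '-' index per label and the list of '=' events
def passEvStep (st : PySem.Dict String Int × List (Int × String × Int)) (is_ : Int × String) :
    PySem.Dict String Int × List (Int × String × Int) :=
  if PySem.Str.isIn "=" is_.2 then
    match splitEq is_.2 with
    | [label, n] => (st.1, st.2 ++ [(is_.1, label, (PySem.Int.ofStr? n).getD 0)])
    | _ => st   -- Python raises ValueError here; excluded by Pre_solve
  else
    (st.1.insert (PySem.Str.slice is_.2 none (some (-1))) is_.1, st.2)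

-- second loop: keep only '=' events after the label's last '-'
def focStep (lm : PySem.Dict String Int) (foc : PySem.Dict String Int) (e : Int × String × Int) :
    PySem.Dict String Int :=
  if lm.getD e.2.1 (-1) < e.1 then foc.insert e.2.1 e.2.2 else foc

-- third loop: per-box slot counters over foc in insertion order
def slotStep (st : Int × List Int) (lf : String × Int) : Int × List Int :=
  let b := pyHash lf.1
  let c := PySem.List.pyGetD st.2 b 0 + 1
  (st.1 + (b + 1) * c * lf.2, PySem.List.pySetD st.2 b c)

def solve_alt (p : List String) : Int × Int :=
  let part1 := (p.map (fun s => pyHash s)).sum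
  let ev := (PySem.List.enumerate p 0).foldl passEvStep (PySem.Dict.empty, [])
  let foc := ev.2.foldl (focStep ev.1) PySem.Dict.empty
  (part1, (foc.items.foldl slotStep (0, List.replicate 256 0)).1)

-- ===== PRECONDITION & SPEC =====
-- Pre_solve excludes exactly the inputs where Python A raises: a string containing '=' must split
-- into exactly two pieces ('a=b=c' → ValueError on unpacking) and the piece after '=' must be an
-- int literal (otherwise int(n) → ValueError).
def Pre_solve (p : List String) : Prop :=
  ∀ s ∈ p, PySem.Str.isIn "=" s = true →
    (splitEq s).length = 2 ∧
    (PySem.Int.ofStr? ((splitEq s).getD 1 "")).isSome = true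
instance (p : List String) : Decidable (Pre_solve p) := by unfold Pre_solve; infer_instance

def pvWitness_solve : List String := ["rn=1", "cm-", "qp=3", "cm=2", "qp-"]

def Spec_solve (p : List String) (out : Int × Int) : Prop := out = solve_alt p
instance (p : List String) (out : Int × Int) : Decidable (Spec_solve p out) := by unfold Spec_solve; infer_instance

-- ===== CLAIM (what is proved, stated in full; the proofs are below) =====
def Claim_equal_solve : Prop := ∀ (p : List String), Dom_solve p → Pre_solve p → Spec_solve p (solve p)

-- ===== LEMMAS AND PROOFS =====

-- proof-only abbreviations for the three stages
def dOf (p : List String) : PySem.Dict Int (PySem.Dict String Int) :=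
  p.foldl solveStepA PySem.Dict.empty
def evOf (p : List String) : PySem.Dict String Int × List (Int × String × Int) :=
  (PySem.List.enumerate p 0).foldl passEvStep (PySem.Dict.empty, [])
def focOf (p : List String) : PySem.Dict String Int :=
  (evOf p).2.foldl (focStep (evOf p).1) PySem.Dict.empty

-- the correspondence invariant: A's box b is the hash-b restriction of B's flat foc dict
def InvSolve (p : List String) : Prop :=
  (∀ b : Int, 0 ≤ b → b < 256 →
      ((dOf p).getD b PySem.Dict.empty).items = (focOf p).items.filter (fun e => pyHash e.1 == b)) ∧
  (dOf p).keys.Nodup ∧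
  (∀ k ∈ (dOf p).keys, 0 ≤ k ∧ k < 256) ∧
  (∀ e ∈ (evOf p).2, e.1 < (p.length : Int)) ∧
  (∀ L : String, (evOf p).1.getD L (-1) < (p.length : Int))

theorem hashFold_bounds (l : List Char) (r : Int) (h0 : 0 ≤ r) (h1 : r < 256) :
    0 ≤ l.foldl (fun result c => PySem.Int.mod ((result + (c.toNat : Int)) * 17) 256) r ∧
    l.foldl (fun result c => PySem.Int.mod ((result + (c.toNat : Int)) * 17) 256) r < 256 := by
  induction l generalizing r with
  | nil => exact ⟨h0, h1⟩
  | cons c t ih =>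
      exact ih _ (PySem.Int.mod_nonneg _ (by norm_num)) (PySem.Int.mod_lt _ (by norm_num))

theorem pyHash_bounds (s : String) : 0 ≤ pyHash s ∧ pyHash s < 256 :=
  hashFold_bounds s.toList 0 (by norm_num) (by norm_num)

theorem evOf_snoc (p : List String) (s : String) :
    evOf (p ++ [s]) = passEvStep (evOf p) ((p.length : Int), s) := by
  unfold evOf
  rw [PySem.List.enumerate_append, List.foldl_append]
  simp [PySem.List.enumerate]

theorem dOf_snoc (p : List String) (s : String) :
    dOf (p ++ [s]) = solveStepA (dOf p) s := by
  unfold dOf; rw [List.foldl_append]; rfl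

-- list-level facts about the items of erase / insert
theorem filter_not_key_map_replace (l : List (String × Int)) (k : String) (v : Int) :
    (l.map (fun p => if p.1 == k then (k, v) else p)).filter (fun p => !(p.1 == k))
      = l.filter (fun p => !(p.1 == k)) := by
  induction l with
  | nil => rfl
  | cons e t ih =>
      by_cases he : e.1 = k
      · simpa [he] using ih
      · simpa [he] using ih

theorem map_replace_filter_comm (l : List (String × Int)) (k : String) (v : Int) (b : Int) :
    (l.map (fun p => if p.1 == k then (k, v) else p)).filter (fun e => pyHash e.1 == b)
      = (l.filter (fun e => pyHash e.1 == b)).map (fun p => if p.1 == k then (k, v) else p) := by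
  induction l with
  | nil => rfl
  | cons e t ih =>
      rw [List.map_cons, List.filter_cons, List.filter_cons]
      by_cases he : e.1 = k
      · have hfe : (if e.1 == k then (k, v) else e) = (k, v) := by simp [he]
        rw [hfe]
        rcases Bool.eq_false_or_eq_true (pyHash e.1 == b) with h1 | h1
        · have h1' : (pyHash (k, v).1 == b) = true := by
            show (pyHash k == b) = true
            rw [← he]; exact h1
          rw [h1, h1', if_pos rfl, if_pos rfl, List.map_cons, hfe, ih]
        · have h1' : (pyHash (k, v).1 == b) = false := by
            show (pyHash k == b) = false
            rw [← he]; exact h1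
          rw [h1, h1', if_neg Bool.false_ne_true, if_neg Bool.false_ne_true, ih]
      · have hfe : (if e.1 == k then (k, v) else e) = e := by simp [he]
        rw [hfe]
        rcases Bool.eq_false_or_eq_true (pyHash e.1 == b) with h1 | h1
        · rw [h1, if_pos rfl, if_pos rfl, List.map_cons, hfe, ih]
        · rw [h1, if_neg Bool.false_ne_true, if_neg Bool.false_ne_true, ih]

theorem map_replace_filter_key (l : List (String × Int)) (k k' : String) (v : Int) (h : k' ≠ k) :
    (l.map (fun p => if p.1 == k' then (k', v) else p)).filter (fun p => !(p.1 == k))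
      = (l.filter (fun p => !(p.1 == k))).map (fun p => if p.1 == k' then (k', v) else p) := by
  induction l with
  | nil => rfl
  | cons e t ih =>
      rw [List.map_cons, List.filter_cons, List.filter_cons]
      by_cases he : e.1 = k'
      · have hfe : (if e.1 == k' then (k', v) else e) = (k', v) := by simp [he]
        have hp1 : (!((k', v).1 == k)) = true := by simp [h]
        have hp2 : (!(e.1 == k)) = true := by simp [he, h]
        rw [hfe, hp1, hp2, if_pos rfl, if_pos rfl, List.map_cons, hfe, ih]
      · have hfe : (if e.1 == k' then (k', v) else e) = e := by simp [he]
        rw [hfe]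
        rcases Bool.eq_false_or_eq_true (!(e.1 == k)) with h1 | h1
        · rw [h1, if_pos rfl, if_pos rfl, List.map_cons, hfe, ih]
        · rw [h1, if_neg Bool.false_ne_true, if_neg Bool.false_ne_true, ih]

theorem any_key_filter_ne (l : List (String × Int)) (k k' : String) (h : k' ≠ k) :
    ((l.filter (fun p => !(p.1 == k))).any (fun p => p.1 == k'))
      = l.any (fun p => p.1 == k') := by
  induction l with
  | nil => rfl
  | cons e t ih =>
      rw [List.filter_cons, List.any_cons]
      by_cases he : e.1 = k
      · have h1 : (!(e.1 == k)) = false := by simp [he]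
        have h2 : (e.1 == k') = false := by
          refine beq_eq_false_iff_ne.mpr ?_
          rw [he]; exact fun hq => h hq.symm
        rw [h1, h2]
        simp only [Bool.false_eq_true, if_false, Bool.false_or]
        exact ih
      · have h1 : (!(e.1 == k)) = true := by simp [he]
        rw [h1, if_pos rfl, List.any_cons, ih]

theorem erase_insert_self (d : PySem.Dict String Int) (k : String) (v : Int) :
    (d.insert k v).erase k = d.erase k := by
  apply PySem.Dict.ext
  show ((d.insert k v).items).filter (fun p => !(p.1 == k)) = d.items.filter (fun p => !(p.1 == k))
  rw [PySem.Dict.items_insert]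
  split
  · exact filter_not_key_map_replace d.items k v
  · simp

theorem erase_contains_ne (d : PySem.Dict String Int) (k k' : String) (h : k' ≠ k) :
    (d.erase k).contains k' = d.contains k' :=
  any_key_filter_ne d.items k k' h

theorem erase_insert_ne (d : PySem.Dict String Int) (k k' : String) (v : Int) (h : k' ≠ k) :
    (d.insert k' v).erase k = (d.erase k).insert k' v := by
  apply PySem.Dict.ext
  show ((d.insert k' v).items).filter (fun p => !(p.1 == k)) = ((d.erase k).insert k' v).items
  rw [PySem.Dict.items_insert, PySem.Dict.items_insert, erase_contains_ne d k k' h]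
  split
  · exact map_replace_filter_key d.items k k' v h
  · show ((d.items ++ [(k', v)]).filter (fun p => !(p.1 == k)))
        = d.items.filter (fun p => !(p.1 == k)) ++ [(k', v)]
    rw [List.filter_append]
    simp [h]

theorem focFold_erase (es : List (Int × String × Int)) (lm : PySem.Dict String Int)
    (L : String) (i : Int) (hes : ∀ e ∈ es, e.1 < i) (foc0 : PySem.Dict String Int) :
    es.foldl (focStep (lm.insert L i)) (foc0.erase L)
      = (es.foldl (focStep lm) foc0).erase L := by
  induction es generalizing foc0 with
  | nil => rfl
  | cons e t ih =>
      have ht : ∀ x ∈ t, x.1 < i := fun x hx => hes x (List.mem_cons_of_mem _ hx)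
      rw [List.foldl_cons, List.foldl_cons]
      by_cases hL : e.2.1 = L
      · have hcond : ¬ ((lm.insert L i).getD e.2.1 (-1) < e.1) := by
          rw [hL, PySem.Dict.getD_insert, if_pos rfl]
          exact not_lt.mpr (le_of_lt (hes e List.mem_cons_self))
        have h1 : focStep (lm.insert L i) (foc0.erase L) e = foc0.erase L := by
          unfold focStep; rw [if_neg hcond]
        rw [h1]
        by_cases h2 : lm.getD e.2.1 (-1) < e.1
        · have h3 : focStep lm foc0 e = foc0.insert e.2.1 e.2.2 := by
            unfold focStep; rw [if_pos h2]
          rw [h3, ← ih ht (foc0.insert e.2.1 e.2.2), hL, erase_insert_self]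
        · have h3 : focStep lm foc0 e = foc0 := by unfold focStep; rw [if_neg h2]
          rw [h3]; exact ih ht foc0
      · have hgd : (lm.insert L i).getD e.2.1 (-1) = lm.getD e.2.1 (-1) := by
          rw [PySem.Dict.getD_insert, if_neg hL]
        by_cases h2 : lm.getD e.2.1 (-1) < e.1
        · have h1 : focStep (lm.insert L i) (foc0.erase L) e
              = (foc0.erase L).insert e.2.1 e.2.2 := by
            unfold focStep; rw [hgd, if_pos h2]
          have h3 : focStep lm foc0 e = foc0.insert e.2.1 e.2.2 := by
            unfold focStep; rw [if_pos h2]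
          rw [h1, h3, ← erase_insert_ne foc0 L e.2.1 e.2.2 hL]
          exact ih ht _
        · have h1 : focStep (lm.insert L i) (foc0.erase L) e = foc0.erase L := by
            unfold focStep; rw [hgd, if_neg h2]
          have h3 : focStep lm foc0 e = foc0 := by unfold focStep; rw [if_neg h2]
          rw [h1, h3]; exact ih ht foc0

theorem contains_of_items_filter (inner foc : PySem.Dict String Int) (L : String)
    (hit : inner.items = foc.items.filter (fun e => pyHash e.1 == pyHash L)) :
    inner.contains L = foc.contains L := by
  show inner.items.any (fun p => p.1 == L) = foc.items.any (fun p => p.1 == L)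
  rw [hit]
  induction foc.items with
  | nil => rfl
  | cons e t ih =>
      rw [List.filter_cons, List.any_cons]
      by_cases he : e.1 = L
      · have h1 : (pyHash e.1 == pyHash L) = true := by rw [he]; simp
        have h2 : (e.1 == L) = true := by simp [he]
        rw [h1, if_pos rfl, List.any_cons, h2, Bool.true_or, Bool.true_or]
      · have h2 : (e.1 == L) = false := by simp [he]
        rcases Bool.eq_false_or_eq_true (pyHash e.1 == pyHash L) with h1 | h1
        · rw [h1, if_pos rfl, List.any_cons, h2, Bool.false_or, Bool.false_or, ih]
        · rw [h1, if_neg Bool.false_ne_true, h2, Bool.false_or, ih]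

-- the main invariant, by induction from the right over the step list
theorem Inv_all (p : List String) : InvSolve p := by
  induction p using List.reverseRecOn with
  | nil =>
      refine ⟨?_, ?_, ?_, ?_, ?_⟩
      · intro b _ _
        show (PySem.Dict.empty.getD b PySem.Dict.empty).items
            = (PySem.Dict.empty : PySem.Dict String Int).items.filter _
        rw [PySem.Dict.getD_empty]
        rfl
      · simp [dOf, PySem.Dict.keys, PySem.Dict.empty]
      · intro k hk; simp [dOf, PySem.Dict.keys, PySem.Dict.empty] at hk
      · intro e he; simp [evOf, PySem.List.enumerate] at he
      · intro L; simp [evOf, PySem.List.enumerate, PySem.Dict.getD_empty]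
  | append_singleton p s ih =>
      obtain ⟨h256, hnd, hbd, hes, hlm⟩ := ih
      have hlen : ((p ++ [s]).length : Int) = (p.length : Int) + 1 := by simp
      rw [InvSolve, dOf_snoc, evOf_snoc]
      by_cases hc : PySem.Str.isIn "=" s = true
      · -- '=' step (or malformed '=')
        rcases hsp : splitEq s with _ | ⟨label, _ | ⟨n, _ | ⟨c', rest⟩⟩⟩
        · simp only [solveStepA, passEvStep, hc, if_true, hsp]
          have hfoc : focOf (p ++ [s]) = focOf p := by
            unfold focOf
            rw [evOf_snoc]
            simp only [passEvStep, hc, if_true, hsp]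
          rw [hfoc]
          exact ⟨h256, hnd, hbd, fun e he => by rw [hlen]; exact (hes e he).trans (by omega),
                 fun L => by rw [hlen]; exact (hlm L).trans (by omega)⟩
        · simp only [solveStepA, passEvStep, hc, if_true, hsp]
          have hfoc : focOf (p ++ [s]) = focOf p := by
            unfold focOf
            rw [evOf_snoc]
            simp only [passEvStep, hc, if_true, hsp]
          rw [hfoc]
          exact ⟨h256, hnd, hbd, fun e he => by rw [hlen]; exact (hes e he).trans (by omega),
                 fun L => by rw [hlen]; exact (hlm L).trans (by omega)⟩
        · -- the real '=' case: splitEq s = [label, n]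
          simp only [solveStepA, passEvStep, hc, if_true, hsp]
          have hfoc : focOf (p ++ [s])
              = (focOf p).insert label ((PySem.Int.ofStr? n).getD 0) := by
            unfold focOf
            rw [evOf_snoc]
            simp only [passEvStep, hc, if_true, hsp]
            rw [List.foldl_append, List.foldl_cons, List.foldl_nil]
            show focStep (evOf p).1 (focOf p) ((p.length : Int), label, _) = _
            unfold focStep
            rw [if_pos (hlm label)]
            rfl
          rw [hfoc]
          set n' : Int := (PySem.Int.ofStr? n).getD 0 with hn'
          set h := pyHash label with hh
          refine ⟨?_, ?_, ?_, ?_, ?_⟩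
          · intro b hb0 hb1
            rw [PySem.Dict.getD_insert]
            by_cases hbh : b = h
            · subst hbh
              rw [if_pos rfl, PySem.Dict.items_insert, PySem.Dict.items_insert,
                contains_of_items_filter ((dOf p).getD h PySem.Dict.empty) (focOf p) label
                  (by rw [h256 h hb0 hb1, hh])]
              by_cases hcont : (focOf p).contains label = true
              · rw [if_pos hcont, if_pos hcont, h256 h hb0 hb1, map_replace_filter_comm]
              · rw [if_neg hcont, if_neg hcont, List.filter_append, h256 h hb0 hb1]
                have hlb : (pyHash label == h) = true := by rw [hh]; simp
                simp [hlb]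
            · rw [if_neg hbh, PySem.Dict.items_insert]
              by_cases hcont : (focOf p).contains label = true
              · rw [if_pos hcont, h256 b hb0 hb1, map_replace_filter_comm]
                refine ((List.map_congr_left ?_).trans (List.map_id _)).symm
                intro x hx
                have hxb : pyHash x.1 = b := by
                  have := List.of_mem_filter hx
                  simpa using this
                have hxl : x.1 ≠ label := fun hq => hbh (by rw [← hxb, hq])
                simp [hxl]
              · rw [if_neg hcont, List.filter_append, h256 b hb0 hb1]
                have hlb : (pyHash label == b) = false := by
                  rw [beq_eq_false_iff_ne]
                  exact fun hq => hbh ((hh.trans hq).symm)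
                simp [hlb]
          · exact PySem.Dict.nodup_keys_insert _ _ _ hnd
          · intro k hk
            rcases (PySem.Dict.mem_keys_insert _ _ _ _).mp hk with rfl | hk'
            · exact pyHash_bounds label
            · exact hbd k hk'
          · intro e he
            rcases List.mem_append.mp he with he' | he'
            · rw [hlen]; exact (hes e he').trans (by omega)
            · rw [List.mem_singleton] at he'
              subst he'
              rw [hlen]; omega
          · intro L; rw [hlen]; exact (hlm L).trans (by omega)
        · simp only [solveStepA, passEvStep, hc, if_true, hsp]
          have hfoc : focOf (p ++ [s]) = focOf p := by
            unfold focOf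
            rw [evOf_snoc]
            simp only [passEvStep, hc, if_true, hsp]
          rw [hfoc]
          exact ⟨h256, hnd, hbd, fun e he => by rw [hlen]; exact (hes e he).trans (by omega),
                 fun L => by rw [hlen]; exact (hlm L).trans (by omega)⟩
      · -- '-' step
        have hcf : PySem.Str.isIn "=" s = false := by
          rcases Bool.eq_false_or_eq_true (PySem.Str.isIn "=" s) with hq | hq
          · exact absurd hq hc
          · exact hq
        simp only [solveStepA, passEvStep, hcf, Bool.false_eq_true, if_false]
        set L := PySem.Str.slice s none (some (-1)) with hLdef
        set h := pyHash L with hh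
        have hfoc : focOf (p ++ [s]) = (focOf p).erase L := by
          unfold focOf
          rw [evOf_snoc]
          simp only [passEvStep, hcf, Bool.false_eq_true, if_false]
          have hemp : (PySem.Dict.empty : PySem.Dict String Int)
              = (PySem.Dict.empty : PySem.Dict String Int).erase L := rfl
          nth_rewrite 1 [hemp]
          exact focFold_erase (evOf p).2 (evOf p).1 L (p.length : Int) hes _
        rw [hfoc]
        refine ⟨?_, ?_, ?_, ?_, ?_⟩
        · intro b hb0 hb1
          have herase : ((focOf p).erase L).items
              = (focOf p).items.filter (fun e => !(e.1 == L)) := rfl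
          rw [herase, PySem.Dict.getD_insert]
          by_cases hbh : b = h
          · subst hbh
            rw [if_pos rfl]
            show (((dOf p).getD h PySem.Dict.empty).items.filter (fun e => !(e.1 == L))) = _
            rw [h256 h hb0 hb1, List.filter_filter, List.filter_filter]
            apply List.filter_congr
            intro x _
            exact Bool.and_comm _ _
          · rw [if_neg hbh, h256 b hb0 hb1, List.filter_filter]
            apply List.filter_congr
            intro x _
            by_cases hx : pyHash x.1 = b
            · have : x.1 ≠ L := fun hq => hbh (by rw [← hx, hq])
              simp [hx, this]
            · simp [hx]
        · exact PySem.Dict.nodup_keys_insert _ _ _ hnd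
        · intro k hk
          rcases (PySem.Dict.mem_keys_insert _ _ _ _).mp hk with rfl | hk'
          · exact pyHash_bounds L
          · exact hbd k hk'
        · intro e he
          rw [hlen]; exact (hes e he).trans (by omega)
        · intro L'
          rw [PySem.Dict.getD_insert, hlen]
          split
          · omega
          · exact (hlm L').trans (by omega)

-- ===== part 2: both sides equal a sum over pyRange 0 256 =====

def T (b : Int) (l : List (String × Int)) (c : Int) : Int :=
  ((PySem.List.enumerate l (c + 1)).map (fun jf => (b + 1) * jf.1 * jf.2.2)).sum

theorem enumerate_map {α β : Type} (h : α → β) (xs : List α) (s : Int) :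
    PySem.List.enumerate (xs.map h) s = (PySem.List.enumerate xs s).map (fun p => (p.1, h p.2)) := by
  induction xs generalizing s with
  | nil => rfl
  | cons x t ih => simp [PySem.List.enumerate_cons, ih]

theorem pyGetD_set_self {α : Type} (v : List α) (i : Int)
    (h0 : 0 ≤ i) (h1 : i < (v.length : Int)) (x d : α) :
    PySem.List.pyGetD (PySem.List.pySetD v i x) i d = x := by
  rw [PySem.List.pySetD_of_nonneg _ _ h0]
  rw [show i = ((i.toNat : Nat) : Int) from by omega, PySem.List.pyGetD_natCast]
  simp only [Int.toNat_natCast]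
  have : i.toNat < v.length := by omega
  simp [List.getD, List.getElem?_set_self this]

theorem pyGetD_set_ne {α : Type} (v : List α) (i b : Int)
    (h0 : 0 ≤ i) (hb : 0 ≤ b) (hne : i ≠ b) (x d : α) :
    PySem.List.pyGetD (PySem.List.pySetD v i x) b d = PySem.List.pyGetD v b d := by
  rw [PySem.List.pySetD_of_nonneg _ _ h0]
  have hbe : b = ((b.toNat : Nat) : Int) := by omega
  rw [hbe, PySem.List.pyGetD_natCast, PySem.List.pyGetD_natCast]
  have : i.toNat ≠ b.toNat := by omega
  simp [List.getD, List.getElem?_set_ne this]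

theorem sum_map_single (R : List Int) (f g : Int → Int) (b0 δ : Int)
    (hR : R.Nodup) (hmem : b0 ∈ R)
    (hag : ∀ b ∈ R, b ≠ b0 → f b = g b) (hb0 : f b0 = δ + g b0) :
    (R.map f).sum = δ + (R.map g).sum := by
  induction R with
  | nil => cases hmem
  | cons r t ih =>
      rw [List.nodup_cons] at hR
      rcases List.mem_cons.mp hmem with rfl | hmem'
      · have : t.map f = t.map g := by
          apply List.map_congr_left
          intro b hb
          exact hag b (List.mem_cons_of_mem _ hb) (fun hq => hR.1 (hq ▸ hb))
        simp only [List.map_cons, List.sum_cons, this, hb0]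
        ring
      · have hr : f r = g r := hag r List.mem_cons_self (fun hq => hR.1 (hq ▸ hmem'))
        have := ih hR.2 hmem' (fun b hb => hag b (List.mem_cons_of_mem _ hb))
        simp only [List.map_cons, List.sum_cons, hr, this]
        ring

theorem pyRange256_nodup : (PySem.List.pyRange 0 256 1).Nodup := by
  rw [PySem.List.pyRange_of_pos 0 256 (by norm_num)]
  exact (List.nodup_range).map (fun a b hab => by omega)

theorem slotFold (E : List (String × Int)) (acc : Int) (slots : List Int)
    (hlen : slots.length = 256) :
    (E.foldl slotStep (acc, slots)).1
      = acc + ((PySem.List.pyRange 0 256 1).map (fun b =>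
          T b (E.filter (fun e => pyHash e.1 == b)) (PySem.List.pyGetD slots b 0))).sum := by
  induction E generalizing acc slots with
  | nil =>
      rw [List.foldl_nil,
        List.map_congr_left (l := PySem.List.pyRange 0 256 1)
          (f := fun b => T b (List.filter (fun e => pyHash e.1 == b) [])
            (PySem.List.pyGetD slots b 0)) (g := fun _ => (0 : Int)) (fun b _ => rfl)]
      rw [List.map_const', List.sum_replicate, smul_zero, add_zero]
  | cons e E ih =>
      obtain ⟨hb00, hb01⟩ := pyHash_bounds e.1
      set b0 := pyHash e.1 with hb0def
      set g := PySem.List.pyGetD slots b0 0 with hgdef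
      rw [List.foldl_cons]
      show ((E.foldl slotStep (acc + (b0 + 1) * (g + 1) * e.2, PySem.List.pySetD slots b0 (g + 1))).1) = _
      rw [ih _ _ (by rw [PySem.List.pySetD_of_nonneg _ _ hb00, List.length_set]; exact hlen)]
      have hmem : b0 ∈ PySem.List.pyRange 0 256 1 :=
        (PySem.List.mem_pyRange_iff_of_pos (by norm_num) b0).mpr ⟨hb00, hb01, by simp⟩
      rw [sum_map_single (PySem.List.pyRange 0 256 1)
        (fun b => T b (((e :: E).filter (fun x => pyHash x.1 == b))) (PySem.List.pyGetD slots b 0))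
        (fun b => T b ((E.filter (fun x => pyHash x.1 == b)))
          (PySem.List.pyGetD (PySem.List.pySetD slots b0 (g + 1)) b 0))
        b0 ((b0 + 1) * (g + 1) * e.2) pyRange256_nodup hmem ?_ ?_]
      · ring
      · intro b hb hne
        obtain ⟨hb0', hb1', -⟩ := (PySem.List.mem_pyRange_iff_of_pos (by norm_num) b).mp hb
        show T b (List.filter (fun x => pyHash x.1 == b) (e :: E)) (PySem.List.pyGetD slots b 0)
            = T b (List.filter (fun x => pyHash x.1 == b) E)
              (PySem.List.pyGetD (PySem.List.pySetD slots b0 (g + 1)) b 0)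
        have hp : (pyHash e.1 == b) = false := by
          rw [beq_eq_false_iff_ne, ← hb0def]
          exact fun hq => hne hq.symm
        rw [List.filter_cons, hp, if_neg Bool.false_ne_true,
          pyGetD_set_ne slots b0 b hb00 hb0' (fun hq => hne hq.symm)]
      · show T b0 (List.filter (fun x => pyHash x.1 == b0) (e :: E)) (PySem.List.pyGetD slots b0 0)
            = (b0 + 1) * (g + 1) * e.2 + T b0 (List.filter (fun x => pyHash x.1 == b0) E)
              (PySem.List.pyGetD (PySem.List.pySetD slots b0 (g + 1)) b0 0)
        have hpt : (pyHash e.1 == b0) = true := by rw [← hb0def]; simp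
        rw [List.filter_cons, hpt, if_pos rfl,
          pyGetD_set_self slots b0 hb00 (by rw [hlen]; exact_mod_cast hb01)]
        unfold T
        rw [PySem.List.enumerate_cons]
        simp only [List.map_cons, List.sum_cons]
        rfl

theorem getD_replicate_zero (b : Int) (h0 : 0 ≤ b) (h1 : b < 256) :
    PySem.List.pyGetD (List.replicate 256 (0 : Int)) b 0 = 0 := by
  rw [show b = ((b.toNat : Nat) : Int) from by omega, PySem.List.pyGetD_natCast]
  unfold List.getD
  rw [List.getElem?_replicate]
  split <;> rfl

-- A's part2 as a sum over pyRange 0 256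
theorem part2A_eq (d : PySem.Dict Int (PySem.Dict String Int))
    (hnd : d.keys.Nodup) (hbd : ∀ k ∈ d.keys, 0 ≤ k ∧ k < 256) :
    (d.items.map (fun bd =>
      ((PySem.List.enumerate bd.2.values 1).map (fun lf => (bd.1 + 1) * lf.1 * lf.2)).sum)).sum
    = ((PySem.List.pyRange 0 256 1).map (fun b =>
        ((PySem.List.enumerate (d.getD b PySem.Dict.empty).values 1).map
          (fun lf => (b + 1) * lf.1 * lf.2)).sum)).sum := by
  set F : Int → Int := fun b => ((PySem.List.enumerate (d.getD b PySem.Dict.empty).values 1).map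
      (fun lf => (b + 1) * lf.1 * lf.2)).sum with hF
  have hzero : ∀ b : Int, b ∉ d.keys → F b = 0 := by
    intro b hb
    have hcf : d.contains b = false := by
      rcases Bool.eq_false_or_eq_true (d.contains b) with hq | hq
      · exact absurd ((PySem.Dict.contains_iff_mem_keys d b).mp hq) hb
      · exact hq
    show ((PySem.List.enumerate (d.getD b PySem.Dict.empty).values 1).map
        (fun lf => (b + 1) * lf.1 * lf.2)).sum = 0
    rw [PySem.Dict.getD_of_not_contains _ _ hcf]
    rfl
  have hsub : ∀ k ∈ d.keys, k ∈ PySem.List.pyRange 0 256 1 := by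
    intro k hk
    exact (PySem.List.mem_pyRange_iff_of_pos (by norm_num) k).mpr
      ⟨(hbd k hk).1, (hbd k hk).2, by simp⟩
  have hitems : d.items.map (fun bd =>
      ((PySem.List.enumerate bd.2.values 1).map (fun lf => (bd.1 + 1) * lf.1 * lf.2)).sum)
      = d.keys.map F := by
    rw [PySem.Dict.items_eq_map_keys d hnd PySem.Dict.empty, List.map_map]
    rfl
  rw [hitems]
  have hstep1 : (d.keys.map F).sum = ∑ x ∈ d.keys.toFinset, F x := (List.sum_toFinset F hnd).symm
  have hstep2 : ∑ x ∈ d.keys.toFinset, F x = ∑ x ∈ (PySem.List.pyRange 0 256 1).toFinset, F x := by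
    refine Finset.sum_subset ?_ ?_
    · intro x hx
      exact List.mem_toFinset.mpr (hsub x (List.mem_toFinset.mp hx))
    · intro x _ hx
      exact hzero x (fun hm => hx (List.mem_toFinset.mpr hm))
  have hstep3 : ∑ x ∈ (PySem.List.pyRange 0 256 1).toFinset, F x
      = ((PySem.List.pyRange 0 256 1).map F).sum := List.sum_toFinset F pyRange256_nodup
  rw [hstep1, hstep2, hstep3]

-- ===== VERDICT (by name: the statement is the Claim_ definition above) =====
theorem solve_spec : Claim_equal_solve := by
  intro p _ _
  unfold Spec_solve solve solve_alt
  obtain ⟨h256, hnd, hbd, hes, hlm⟩ := Inv_all p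
  dsimp only
  rw [Prod.mk.injEq]
  refine ⟨rfl, ?_⟩
  show (((p.foldl solveStepA PySem.Dict.empty).items.map (fun bd =>
      ((PySem.List.enumerate bd.2.values 1).map (fun lf => (bd.1 + 1) * lf.1 * lf.2)).sum)).sum)
      = ((focOf p).items.foldl slotStep (0, List.replicate 256 0)).1
  rw [show p.foldl solveStepA PySem.Dict.empty = dOf p from rfl]
  rw [part2A_eq (dOf p) hnd hbd]
  rw [slotFold (focOf p).items 0 (List.replicate 256 0) (List.length_replicate)]
  rw [zero_add]
  apply congrArg
  apply List.map_congr_left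
  intro b hb
  obtain ⟨hb0, hb1, -⟩ := (PySem.List.mem_pyRange_iff_of_pos (by norm_num) b).mp hb
  rw [getD_replicate_zero b hb0 hb1]
  have hv : ((dOf p).getD b PySem.Dict.empty).values
      = ((focOf p).items.filter (fun e => pyHash e.1 == b)).map Prod.snd := by
    show ((dOf p).getD b PySem.Dict.empty).items.map Prod.snd = _
    rw [h256 b hb0 hb1]
  rw [hv, enumerate_map, List.map_map]
  rfl
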